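-- pv_equiv track=rewrite | github.com/jdisset/dracon | dracon/interpolation_utils.py | fast_prescreen_interpolation_exprs_check
-- ===== SOURCE A (Python) =====
-- def fast_prescreen_interpolation_exprs_check(  # 5000x faster prescreen but very simple and limited
--     text: str, interpolation_start_char='$', interpolation_boundary_chars=('{}', '()')
-- ) -> bool:
--     start_patterns = [interpolation_start_char + bound[0] for bound in interpolation_boundary_chars]
--     for start_pattern in start_patterns:
--         if start_pattern in text:
--             return True
--     return False
-- ===== SOURCE B (Python) =====
-- def fast_prescreen_interpolation_exprs_check(
--     text: str, interpolation_start_char='$', interpolation_boundary_chars=('{}', '()')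
-- ) -> bool:
--     openers = {bound[0] for bound in interpolation_boundary_chars}
--     k = len(interpolation_start_char)
--     for i in range(len(text) - k):
--         if text[i:i+k] == interpolation_start_char and text[i+k] in openers:
--             return True
--     return False
-- ===== Notes on version B (the rewrite author's own statement) =====
-- stated objective: alternative
-- what changed: Instead of concatenating a start pattern per boundary string and running a substring search for each, B builds the set of opening boundary characters once and makes a single left-to-right scan of the text, testing at each index whether the start string matches there and the next character is an opener.
import Mathlib
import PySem

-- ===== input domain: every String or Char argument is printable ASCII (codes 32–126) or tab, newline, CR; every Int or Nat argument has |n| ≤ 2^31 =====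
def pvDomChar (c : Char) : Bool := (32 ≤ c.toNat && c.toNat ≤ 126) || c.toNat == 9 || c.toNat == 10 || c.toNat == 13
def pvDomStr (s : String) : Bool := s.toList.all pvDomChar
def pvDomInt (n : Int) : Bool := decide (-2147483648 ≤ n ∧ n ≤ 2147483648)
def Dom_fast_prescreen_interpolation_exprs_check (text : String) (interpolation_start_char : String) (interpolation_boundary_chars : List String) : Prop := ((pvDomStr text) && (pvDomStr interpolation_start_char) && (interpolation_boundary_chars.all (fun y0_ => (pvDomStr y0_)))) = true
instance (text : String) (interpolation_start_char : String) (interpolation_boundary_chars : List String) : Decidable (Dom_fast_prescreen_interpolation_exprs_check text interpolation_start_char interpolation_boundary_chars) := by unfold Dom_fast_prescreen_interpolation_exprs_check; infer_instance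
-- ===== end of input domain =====

-- B replaces A's build-patterns-then-substring-search loop by a single left-to-right scan of the
-- text against the set of opening boundary characters (objective: alternative decomposition).
-- Both programs raise IndexError on an empty boundary string, so Pre_ excludes those inputs.

-- ===== PORT A =====
-- the 'for start_pattern in start_patterns: if start_pattern in text: return True' loop
def pvALoop (text : List Char) : List (List Char) → Bool
  | [] => false
  | p :: ps => if PySem.Chars.isIn p text then true else pvALoop text ps

def fast_prescreen_interpolation_exprs_check (text : String) (interpolation_start_char : String) (interpolation_boundary_chars : List String) : Bool :=
  -- start_patterns = [interpolation_start_char + bound[0] for bound in interpolation_boundary_chars]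
  -- bound[0] is pyGetD with an arbitrary default: Pre_ guarantees every bound is nonempty
  let start_patterns : List (List Char) :=
    interpolation_boundary_chars.map
      (fun bound => interpolation_start_char.toList ++ [PySem.List.pyGetD bound.toList 0 ' '])
  pvALoop text.toList start_patterns

-- ===== PORT B =====
def fast_prescreen_interpolation_exprs_check_alt (text : String) (interpolation_start_char : String) (interpolation_boundary_chars : List String) : Bool :=
  -- openers = {bound[0] for bound in interpolation_boundary_chars}
  let openers : PySem.Set Char :=
    PySem.Set.ofList
      (interpolation_boundary_chars.map (fun bound => PySem.List.pyGetD bound.toList 0 ' '))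
  let t := text.toList
  let k : Int := (interpolation_start_char.toList.length : Int)
  -- for i in range(len(text) - k): if text[i:i+k] == start and text[i+k] in openers: return True
  (PySem.List.pyRange 0 ((t.length : Int) - k) 1).any
    (fun i =>
      decide (PySem.List.slice t (some i) (some (i + k)) = interpolation_start_char.toList)
        && PySem.Set.contains openers (PySem.List.pyGetD t (i + k) ' '))

-- ===== PRECONDITION & SPEC =====
-- Pre_ excludes inputs with an empty boundary string, on which both A and B raise IndexError (bound[0]).
def Pre_fast_prescreen_interpolation_exprs_check (text : String) (interpolation_start_char : String) (interpolation_boundary_chars : List String) : Prop :=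
  ∀ b ∈ interpolation_boundary_chars, b ≠ ""
instance (text : String) (interpolation_start_char : String) (interpolation_boundary_chars : List String) : Decidable (Pre_fast_prescreen_interpolation_exprs_check text interpolation_start_char interpolation_boundary_chars) := by unfold Pre_fast_prescreen_interpolation_exprs_check; infer_instance

def pvWitness_fast_prescreen_interpolation_exprs_check : String × String × List String := ("a${b}", "$", ["{}", "()"])

def Spec_fast_prescreen_interpolation_exprs_check (text : String) (interpolation_start_char : String) (interpolation_boundary_chars : List String) (out : Bool) : Prop := out = fast_prescreen_interpolation_exprs_check_alt text interpolation_start_char interpolation_boundary_chars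
instance (text : String) (interpolation_start_char : String) (interpolation_boundary_chars : List String) (out : Bool) : Decidable (Spec_fast_prescreen_interpolation_exprs_check text interpolation_start_char interpolation_boundary_chars out) := by unfold Spec_fast_prescreen_interpolation_exprs_check; infer_instance

-- ===== CLAIM (what is proved, stated in full; the proofs are below) =====
def Claim_equal_fast_prescreen_interpolation_exprs_check : Prop := ∀ (text : String) (interpolation_start_char : String) (interpolation_boundary_chars : List String), Dom_fast_prescreen_interpolation_exprs_check text interpolation_start_char interpolation_boundary_chars → Pre_fast_prescreen_interpolation_exprs_check text interpolation_start_char interpolation_boundary_chars → Spec_fast_prescreen_interpolation_exprs_check text interpolation_start_char interpolation_boundary_chars (fast_prescreen_interpolation_exprs_check text interpolation_start_char interpolation_boundary_chars)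

-- ===== LEMMAS AND PROOFS =====

-- A's early-return loop is List.any
lemma pvALoop_eq_any (t : List Char) (ps : List (List Char)) :
    pvALoop t ps = ps.any (fun p => PySem.Chars.isIn p t) := by
  induction ps with
  | nil => rfl
  | cons p ps ih => cases h : PySem.Chars.isIn p t <;> simp [pvALoop, ih, h]

-- set membership after a set comprehension
lemma pvContains_ofList (xs : List Char) (x : Char) :
    PySem.Set.contains (PySem.Set.ofList xs) x = true ↔ x ∈ xs := by
  simp [PySem.Set.contains, PySem.Set.mem_ofList]

-- a prefix of the shape s ++ [c]
lemma pvPrefix_append_singleton (u s : List Char) (c : Char) :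
    (s ++ [c]) <+: u ↔ u.take s.length = s ∧ u[s.length]? = some c := by
  constructor
  · rintro ⟨r, rfl⟩
    constructor
    · rw [List.append_assoc, List.take_left]
    · rw [List.append_assoc, List.getElem?_append_right le_rfl]
      simp
  · rintro ⟨h1, h2⟩
    obtain ⟨hlt, hc⟩ := List.getElem?_eq_some_iff.mp h2
    refine ⟨u.drop (s.length + 1), ?_⟩
    conv_rhs => rw [← List.take_append_drop s.length u]
    rw [h1, List.drop_eq_getElem_cons hlt, hc, List.append_assoc]
    rfl

-- the substring test 's ++ [c] in t' as an index-wise scan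
lemma pvIsIn_append_singleton (s t : List Char) (c : Char) :
    PySem.Chars.isIn (s ++ [c]) t = true ↔
      ∃ j : Nat, (t.drop j).take s.length = s ∧ t[j + s.length]? = some c := by
  rw [← PySem.Chars.exists_prefix_drop_iff_isIn]
  constructor
  · rintro ⟨j, hj⟩
    obtain ⟨h1, h2⟩ := (pvPrefix_append_singleton _ _ _).mp hj
    exact ⟨j, h1, by rw [← List.getElem?_drop]; exact h2⟩
  · rintro ⟨j, h1, h2⟩
    exact ⟨j, (pvPrefix_append_singleton _ _ _).mpr ⟨h1, by rw [List.getElem?_drop]; exact h2⟩⟩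

-- the two ports agree (unconditionally; Pre_ only marks where the Pythons raise)
lemma pvMain (text ischar : String) (bounds : List String) :
    fast_prescreen_interpolation_exprs_check text ischar bounds =
      fast_prescreen_interpolation_exprs_check_alt text ischar bounds := by
  unfold fast_prescreen_interpolation_exprs_check fast_prescreen_interpolation_exprs_check_alt
  rw [pvALoop_eq_any, Bool.eq_iff_iff, List.any_eq_true, List.any_eq_true]
  simp only [List.mem_map]
  constructor
  · rintro ⟨p, ⟨b, hb, rfl⟩, hin⟩
    obtain ⟨j, h1, h2⟩ := (pvIsIn_append_singleton _ _ _).mp hin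
    obtain ⟨hlt, hc⟩ := List.getElem?_eq_some_iff.mp h2
    have hidx : ((j : Int) + (ischar.toList.length : Int)) = ((j + ischar.toList.length : Nat) : Int) := by
      push_cast; ring
    refine ⟨(j : Int), ?_, ?_⟩
    · rw [PySem.List.mem_pyRange_one]
      exact ⟨Int.natCast_nonneg j, by omega⟩
    · rw [Bool.and_eq_true, decide_eq_true_iff]
      refine ⟨?_, ?_⟩
      · rw [PySem.List.slice_natCast_add]
        exact h1
      · rw [hidx, PySem.List.pyGetD_natCast, pvContains_ofList, List.mem_map]
        refine ⟨b, hb, ?_⟩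
        rw [List.getD_eq_getElem?_getD, h2]
        rfl
  · rintro ⟨i, hi, htest⟩
    rw [PySem.List.mem_pyRange_one] at hi
    obtain ⟨hi0, hin⟩ := hi
    rw [Bool.and_eq_true, decide_eq_true_iff] at htest
    obtain ⟨hsl, hmem⟩ := htest
    set j : Nat := i.toNat with hjdef
    have hji : (j : Int) = i := Int.toNat_of_nonneg hi0
    have hjlt : j + ischar.toList.length < text.toList.length := by omega
    have hidx : (i + (ischar.toList.length : Int)) = ((j + ischar.toList.length : Nat) : Int) := by
      push_cast; omega
    rw [hidx, PySem.List.pyGetD_natCast, pvContains_ofList, List.mem_map] at hmem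
    obtain ⟨b, hb, hcb⟩ := hmem
    rw [List.getD_eq_getElem?_getD, List.getElem?_eq_getElem hjlt] at hcb
    refine ⟨ischar.toList ++ [PySem.List.pyGetD b.toList 0 ' '], ⟨b, hb, rfl⟩, ?_⟩
    rw [pvIsIn_append_singleton]
    refine ⟨j, ?_, ?_⟩
    · rw [← hji, PySem.List.slice_natCast_add] at hsl
      exact hsl
    · rw [hcb]
      exact List.getElem?_eq_getElem hjlt

-- ===== VERDICT (by name: the statement is the Claim_ definition above) =====
theorem fast_prescreen_interpolation_exprs_check_spec : Claim_equal_fast_prescreen_interpolation_exprs_check := by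
  intro text ischar bounds _ _
  unfold Spec_fast_prescreen_interpolation_exprs_check
  exact pvMain text ischar bounds
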